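-- pv_equiv track=rewrite | github.com/rohanrajpal/foobar-challenge | level3c.py | transform
-- ===== SOURCE A (Python) =====
-- def transform(m):
-- 	n = len(m)
-- 	t_states = []
-- 	nt_states = []
--
-- 	for i in range(n):
-- 		if sum(m[i]) == 0:
-- 			t_states.append(i)
-- 		else:
-- 			nt_states.append(i)
--
-- 	label=[0 for i in range(n)]
--
-- 	for i in range(len(nt_states)):
-- 		label[nt_states[i]] = i
-- 	for i in range(len(t_states)):
-- 		label[t_states[i]] = i + len(nt_states)
--
-- 	new_mat = [[0 for i in range(n)] for j in range(n)]
-- 	for i in range(n):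
-- 		for j in range(n):
-- 			new_mat[label[i]][label[j]] = m[i][j]
--
-- 	return new_mat
-- ===== SOURCE B (Python) =====
-- def transform(m):
--     keyed = sorted(enumerate(m), key=lambda p: 1 if sum(p[1]) == 0 else 0)
--     perm = [i for i, _ in keyed]
--     return [[row[j] for j in perm] for _, row in keyed]
-- ===== Notes on version B (the rewrite author's own statement) =====
-- stated objective: alternative
-- what changed: Replaces A's two index-partition loops, inverse label array and scatter-writes into a preallocated zero matrix by a single stable sort of enumerate(m) on the terminal flag: the sorted pairs carry the rows themselves and the column permutation is read off their indices.
import Mathlib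
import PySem

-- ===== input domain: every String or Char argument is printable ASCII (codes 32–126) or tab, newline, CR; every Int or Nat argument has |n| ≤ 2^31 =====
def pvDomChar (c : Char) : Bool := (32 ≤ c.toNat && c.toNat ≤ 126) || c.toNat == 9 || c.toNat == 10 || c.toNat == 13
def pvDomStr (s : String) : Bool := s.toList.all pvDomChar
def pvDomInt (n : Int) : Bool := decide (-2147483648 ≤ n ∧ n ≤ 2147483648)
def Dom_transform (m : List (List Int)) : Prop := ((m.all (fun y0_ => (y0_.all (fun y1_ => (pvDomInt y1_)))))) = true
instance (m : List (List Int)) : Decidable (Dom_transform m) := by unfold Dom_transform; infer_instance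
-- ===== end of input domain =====

-- B replaces A's two index-partition loops, inverse label array and scatter-writes into a
-- preallocated zero matrix by ONE stable sort of enumerate(m) on the terminal flag: the
-- sorted pairs carry the rows themselves, and the columns are gathered through the sorted
-- index list (objective: alternative decomposition of the same O(n^2) task).

-- ===== PORT A =====
-- Literal port of A: classify states, build the inverse `label` array by two index
-- loops, then scatter m[i][j] into new_mat[label[i]][label[j]].
-- In-range reads m[i] / m[i][j] are ported with getD (inside Pre_transform every such
-- Python access is in range and returns the same value).
def transform (m : List (List Int)) : List (List Int) :=
  let n := m.length
  let ts := (List.range n).foldl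
      (fun (p : List Nat × List Nat) i =>
        if (m.getD i []).sum = 0 then (p.1 ++ [i], p.2) else (p.1, p.2 ++ [i]))
      ([], [])
  let t_states := ts.1
  let nt_states := ts.2
  let label1 := (List.range nt_states.length).foldl
      (fun lab i => lab.set (nt_states.getD i 0) i) (List.replicate n 0)
  let label := (List.range t_states.length).foldl
      (fun lab i => lab.set (t_states.getD i 0) (i + nt_states.length)) label1
  (List.range n).foldl
    (fun mat i =>
      (List.range n).foldl
        (fun mat j =>
          mat.modify (label.getD i 0) (fun row => row.set (label.getD j 0) ((m.getD i []).getD j 0)))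
        mat)
    (List.replicate n (List.replicate n (0 : Int)))

-- ===== PORT B =====
-- Literal port of Source B: stable sort of enumerate(m) by the terminal flag (1 if the row
-- sums to 0 else 0), the column permutation read off the sorted pairs' first components,
-- and the rows read off their second components (row[j] ported with pyGetD; in range
-- under Pre_transform).
def transform_alt (m : List (List Int)) : List (List Int) :=
  let keyed := PySem.List.sorted (PySem.List.enumerate m)
      (fun p => if p.2.sum = 0 then (1 : Int) else 0)
  let perm := keyed.map (fun p => p.1)
  keyed.map (fun p => perm.map (fun j => PySem.List.pyGetD p.2 j 0))

-- ===== PRECONDITION & SPEC =====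
-- Pre_ excludes ragged matrices with a row shorter than len(m): there the Python A
-- (and the Python B) raises IndexError on an m[i][j] / row[j] access.
def Pre_transform (m : List (List Int)) : Prop := ∀ row ∈ m, m.length ≤ row.length
instance (m : List (List Int)) : Decidable (Pre_transform m) := by unfold Pre_transform; infer_instance
def pvWitness_transform : List (List Int) := [[1, 0], [0, 0]]
def Spec_transform (m : List (List Int)) (out : List (List Int)) : Prop := out = transform_alt m
instance (m : List (List Int)) (out : List (List Int)) : Decidable (Spec_transform m out) := by unfold Spec_transform; infer_instance

-- ===== CLAIM (what is proved, stated in full; the proofs are below) =====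
def Claim_equal_transform : Prop := ∀ (m : List (List Int)), Dom_transform m → Pre_transform m → Spec_transform m (transform m)

-- ===== LEMMAS AND PROOFS =====

-- The common middle form both ports are reduced to: the filter-based forward
-- permutation gather (proof-internal only; used by no port).
def pvGather (m : List (List Int)) : List (List Int) :=
  let n := m.length
  let nt_states := (List.range n).filter (fun i => !decide ((m.getD i []).sum = 0))
  let t_states := (List.range n).filter (fun i => decide ((m.getD i []).sum = 0))
  let order := nt_states ++ t_states
  (List.range n).map (fun a =>
    (List.range n).map (fun b => (m.getD (order.getD a 0) []).getD (order.getD b 0) 0))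

-- A's classification foldl produces the two filters.
theorem pvFoldlSplit (P : Nat → Prop) [DecidablePred P] :
    ∀ (l a b : List Nat),
      l.foldl (fun (p : List Nat × List Nat) i =>
          if P i then (p.1 ++ [i], p.2) else (p.1, p.2 ++ [i])) (a, b)
      = (a ++ l.filter (fun i => decide (P i)), b ++ l.filter (fun i => !decide (P i))) := by
  intro l
  induction l with
  | nil => intro a b; simp
  | cons x xs ih =>
    intro a b
    by_cases h : P x <;> simp [List.foldl_cons, h, ih, List.append_assoc]

-- Length is preserved by a foldl of sets.
theorem pvLenFoldlSet (g : Nat × Nat → Nat) :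
    ∀ (l : List (Nat × Nat)) (lab : List Nat),
      (l.foldl (fun lab q => lab.set q.1 (g q)) lab).length = lab.length := by
  intro l
  induction l with
  | nil => intro lab; rfl
  | cons q l ih => intro lab; simp [List.foldl_cons, ih]

-- Reading the label array after setting lab[xs[i]] := f (i + off) for all i.
theorem pvSetAllGetD (f : Nat → Nat) :
    ∀ (xs : List Nat) (off : Nat) (lab : List Nat) (p : Nat), xs.Nodup →
      ((xs.zipIdx off).foldl (fun lab q => lab.set q.1 (f q.2)) lab).getD p 0
      = if p ∈ xs ∧ p < lab.length then f (List.idxOf p xs + off) else lab.getD p 0 := by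
  intro xs
  induction xs with
  | nil => intro off lab p _; simp
  | cons x xs ih =>
    intro off lab p hnd
    have hnd' := hnd.of_cons
    have hx : x ∉ xs := by simp [List.nodup_cons] at hnd; exact hnd.1
    rw [List.zipIdx_cons, List.foldl_cons, ih _ _ _ hnd']
    by_cases hpx : p = x
    · subst hpx
      have : ¬ p ∈ xs := hx
      simp only [this, false_and, if_false, List.length_set]
      by_cases hlt : p < lab.length
      · simp only [List.mem_cons, true_or, true_and, hlt, if_pos, List.idxOf_cons_self,
          Nat.zero_add, List.getD_eq_getElem?_getD, List.getElem?_set]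
        simp [hlt]
      · simp only [List.mem_cons, true_or, true_and, hlt, if_neg, if_false,
          List.getD_eq_getElem?_getD, List.getElem?_set]
        simp [hlt]
    · have hmem : p ∈ x :: xs ↔ p ∈ xs := by simp [hpx]
      have hset : (lab.set x (f off)).getD p 0 = lab.getD p 0 := by
        simp [List.getD_eq_getElem?_getD, List.getElem?_set, Ne.symm hpx]
      have hidx : List.idxOf p (x :: xs) = List.idxOf p xs + 1 := by
        simp [List.idxOf_cons, Ne.symm hpx]
      rw [List.length_set, hset, hidx]
      by_cases hin : p ∈ xs ∧ p < lab.length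
      · simp only [hmem, hin, if_pos, hin.1, hin.2, and_self]
        congr 1
        omega
      · simp [hmem, hin]

-- A's index loop over range(len xs) reading xs[i] equals the zipIdx foldl.
theorem pvRangeFoldlZipIdx (f : Nat → Nat) (xs : List Nat) (lab : List Nat) :
    (List.range xs.length).foldl (fun lab i => lab.set (xs.getD i 0) (f i)) lab
    = (xs.zipIdx 0).foldl (fun lab q => lab.set q.1 (f q.2)) lab := by
  have h1 : List.range xs.length = (xs.zipIdx 0).map Prod.snd := by
    rw [List.zipIdx_map_snd, List.range_eq_range']
  rw [h1, List.foldl_map]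
  apply PySem.List.foldl_congr_mem
  intro lab q hq
  obtain ⟨hle, hlt, hget⟩ := List.mem_zipIdx hq
  have hlt' : q.2 < xs.length := by omega
  have : xs.getD q.2 0 = q.1 := by
    rw [List.getD_eq_getElem?_getD, List.getElem?_eq_getElem hlt', Option.getD_some]
    simp at hget
    exact hget.symm
  rw [this]

-- Nested foldl over two ranges as a single foldl over the pair list.
theorem pvFoldlPairs {β : Type} (g : β → Nat → Nat → β) (l₂ : List Nat) :
    ∀ (l₁ : List Nat) (init : β),
      l₁.foldl (fun acc i => l₂.foldl (fun acc j => g acc i j) acc) init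
      = (l₁.flatMap (fun i => l₂.map (fun j => (i, j)))).foldl (fun acc q => g acc q.1 q.2) init := by
  intro l₁
  induction l₁ with
  | nil => intro init; simp
  | cons x xs ih =>
    intro init
    simp only [List.foldl_cons, List.flatMap_cons, List.foldl_append, List.foldl_map, ih]

-- Matrix shape (length n, every row of the first n rows has length n) is preserved
-- by the scatter writes.
def pvShape (n : Nat) (mat : List (List Int)) : Prop :=
  mat.length = n ∧ ∀ a, a < n → (mat.getD a []).length = n

def pvRead (mat : List (List Int)) (a b : Nat) : Int := (mat.getD a []).getD b 0

theorem pvShapeStep (n : Nat) (mat : List (List Int)) (r c : Nat) (v : Int)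
    (h : pvShape n mat) : pvShape n (mat.modify r (fun row => row.set c v)) := by
  obtain ⟨h1, h2⟩ := h
  constructor
  · simp [List.length_modify, h1]
  · intro a ha
    have h2a := h2 a ha
    rw [List.getD_eq_getElem?_getD] at h2a ⊢
    rw [List.getElem?_modify]
    cases hopt : mat[a]? with
    | none => rw [hopt] at h2a; simpa using h2a
    | some row =>
      rw [hopt] at h2a
      by_cases hra : r = a
      · subst hra
        simp only [Option.map_some, if_pos rfl, Option.getD_some, List.length_set]
        simpa using h2a
      · simp only [Option.map_some, if_neg hra, Option.getD_some]
        simpa using h2a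

theorem pvShapeFoldl (n : Nat) (tgt : Nat × Nat → Nat × Nat) (v : Nat × Nat → Int) :
    ∀ (ps : List (Nat × Nat)) (init : List (List Int)), pvShape n init →
      pvShape n (ps.foldl (fun mat q => mat.modify (tgt q).1 (fun row => row.set (tgt q).2 (v q))) init) := by
  intro ps
  induction ps with
  | nil => intro init h; exact h
  | cons q ps ih =>
    intro init h
    exact ih _ (pvShapeStep n init (tgt q).1 (tgt q).2 (v q) h)

-- Reading one cell after all scatter writes: the last write to that cell wins.
theorem pvReadFoldl (n : Nat) (tgt : Nat × Nat → Nat × Nat) (v : Nat × Nat → Int) :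
    ∀ (ps : List (Nat × Nat)) (init : List (List Int)), pvShape n init →
      ∀ a b, a < n → b < n →
        pvRead (ps.foldl (fun mat q => mat.modify (tgt q).1 (fun row => row.set (tgt q).2 (v q))) init) a b
        = match ps.reverse.find? (fun q => tgt q == (a, b)) with
          | some q => v q
          | none => pvRead init a b := by
  intro ps
  induction ps using List.reverseRecOn with
  | nil => intro init h a b ha hb; simp
  | append_singleton ps q ih =>
    intro init h a b ha hb
    rw [List.foldl_append, List.foldl_cons, List.foldl_nil, List.reverse_append,
        List.reverse_singleton, List.singleton_append, List.find?_cons]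
    set M := ps.foldl (fun mat q => mat.modify (tgt q).1 (fun row => row.set (tgt q).2 (v q))) init with hM
    have hMshape : pvShape n M := pvShapeFoldl n tgt v ps init h
    by_cases heq : tgt q = (a, b)
    · have hbeq : (tgt q == (a, b)) = true := by simp [heq]
      rw [hbeq]
      have hrowlen : (M.getD a []).length = n := hMshape.2 a ha
      have hMa : ∃ row, M[a]? = some row ∧ row.length = n := by
        have halen : a < M.length := hMshape.1 ▸ ha
        refine ⟨M[a], List.getElem?_eq_getElem halen, ?_⟩
        have := hMshape.2 a ha
        rwa [List.getD_eq_getElem?_getD, List.getElem?_eq_getElem halen, Option.getD_some] at this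
      obtain ⟨row, hrow, hrlen⟩ := hMa
      simp only [pvRead, List.getD_eq_getElem?_getD, List.getElem?_modify, heq, hrow,
        if_pos rfl, Option.map_some, Option.getD_some, List.getElem?_set]
      simp [hrlen, hb]
    · have hbeq : (tgt q == (a, b)) = false := by simp [heq]
      rw [hbeq]
      simp only [Bool.false_eq_true, if_false]
      rw [← ih init h a b ha hb]
      by_cases hra : (tgt q).1 = a
      · have hcb : (tgt q).2 ≠ b := by
          intro hc; exact heq (Prod.ext hra hc)
        simp only [pvRead, List.getD_eq_getElem?_getD, List.getElem?_modify, hra, if_pos rfl]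
        cases hopt : M[a]? with
        | none => simp
        | some row => simp [List.getElem?_set, hcb]
      · simp only [pvRead, List.getD_eq_getElem?_getD, List.getElem?_modify]
        cases hopt : M[a]? with
        | none => simp
        | some row => simp [hra]

-- find? finds the unique satisfying element.
theorem pvFindUnique {α : Type} (p : α → Bool) :
    ∀ (l : List α) (x : α), x ∈ l → p x = true → (∀ y ∈ l, p y = true → y = x) →
      l.find? p = some x := by
  intro l
  induction l with
  | nil => intro x hx; simp at hx
  | cons z l ih =>
    intro x hx hpx huniq
    rw [List.find?_cons]
    by_cases hz : p z = true
    · have : z = x := huniq z List.mem_cons_self hz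
      rw [hz]; simp [this]
    · rw [Bool.not_eq_true] at hz
      rw [hz]
      simp only [Bool.false_eq_true, if_false]
      have hx' : x ∈ l := by
        rcases List.mem_cons.1 hx with h | h
        · rw [h] at hpx; rw [hpx] at hz; cases hz
        · exact h
      exact ih x hx' hpx (fun y hy => huniq y (List.mem_cons_of_mem _ hy))

-- A equals the filter-based gather (unconditional: both sides total via getD).
theorem pvAEq (m : List (List Int)) : transform m = pvGather m := by
  unfold transform pvGather
  simp only []
  set n := m.length with hn
  set nt := (List.range n).filter (fun i => !decide ((m.getD i []).sum = 0)) with hnt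
  set t := (List.range n).filter (fun i => decide ((m.getD i []).sum = 0)) with ht
  set order := nt ++ t with horder
  have hts : (List.range n).foldl
      (fun (p : List Nat × List Nat) i =>
        if (m.getD i []).sum = 0 then (p.1 ++ [i], p.2) else (p.1, p.2 ++ [i])) ([], [])
      = (t, nt) := by
    rw [pvFoldlSplit (fun i => (m.getD i []).sum = 0) (List.range n) [] []]
    simp [ht, hnt]
  rw [hts]
  have hperm : order.Perm (List.range n) := by
    have h1 := List.filter_append_perm (fun i => !decide ((m.getD i []).sum = 0)) (List.range n)
    have h2 : (List.range n).filter (fun i => !!decide ((m.getD i []).sum = 0)) = t := by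
      simp [ht]
    rw [h2] at h1
    exact h1
  have hordlen : order.length = n := by rw [hperm.length_eq, List.length_range]
  have hordnd : order.Nodup := hperm.nodup_iff.2 List.nodup_range
  have hordmem : ∀ p, p ∈ order ↔ p < n := by
    intro p; rw [hperm.mem_iff, List.mem_range]
  have hntnd : nt.Nodup := List.Nodup.filter _ List.nodup_range
  have htnd : t.Nodup := List.Nodup.filter _ List.nodup_range
  set label1 := (List.range nt.length).foldl
      (fun lab i => lab.set (nt.getD i 0) i) (List.replicate n 0) with hlabel1
  set label := (List.range t.length).foldl
      (fun lab i => lab.set (t.getD i 0) (i + nt.length)) label1 with hlabel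
  have hlab1len : label1.length = n := by
    rw [hlabel1, pvRangeFoldlZipIdx (fun i => i) nt]
    exact (pvLenFoldlSet (fun q => q.2) (nt.zipIdx 0) (List.replicate n 0)).trans (by simp)
  have hlablen : label.length = n := by
    rw [hlabel, pvRangeFoldlZipIdx (fun i => i + nt.length) t]
    exact (pvLenFoldlSet (fun q => q.2 + nt.length) (t.zipIdx 0) label1).trans hlab1len
  have hlabval : ∀ p, p < n → label.getD p 0 = List.idxOf p order := by
    intro p hp
    have hpor : p ∈ order := (hordmem p).2 hp
    have h2 : label.getD p 0
        = if p ∈ t ∧ p < label1.length then List.idxOf p t + nt.length else label1.getD p 0 := by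
      rw [hlabel, pvRangeFoldlZipIdx (fun i => i + nt.length) t]
      simpa using pvSetAllGetD (fun i => i + nt.length) t 0 label1 p htnd
    have h1 : label1.getD p 0 = if p ∈ nt ∧ p < n then List.idxOf p nt else 0 := by
      rw [hlabel1, pvRangeFoldlZipIdx (fun i => i) nt]
      simpa using pvSetAllGetD (fun i => i) nt 0 (List.replicate n 0) p hntnd
    by_cases hpt : p ∈ t
    · have hpnt : p ∉ nt := by
        intro hc
        rw [hnt, List.mem_filter] at hc
        rw [ht, List.mem_filter] at hpt
        simp at hc hpt
        exact hc.2 hpt.2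
      rw [h2, if_pos ⟨hpt, by omega⟩, horder, List.idxOf_append, if_neg hpnt]
    · have hpnt : p ∈ nt := by
        rcases List.mem_append.1 (horder ▸ hpor) with h | h
        · exact h
        · exact absurd h hpt
      rw [h2, if_neg (by simp [hpt]), h1, if_pos ⟨hpnt, hp⟩, horder, List.idxOf_append, if_pos hpnt]
  set ps := (List.range n).flatMap (fun i => (List.range n).map (fun j => (i, j))) with hps
  have hpsmem : ∀ q : Nat × Nat, q ∈ ps ↔ q.1 < n ∧ q.2 < n := by
    intro q
    rw [hps, List.mem_flatMap]
    constructor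
    · rintro ⟨i, hi, hq⟩
      rw [List.mem_map] at hq
      obtain ⟨j, hj, rfl⟩ := hq
      exact ⟨List.mem_range.1 hi, List.mem_range.1 hj⟩
    · rintro ⟨h1, h2⟩
      exact ⟨q.1, List.mem_range.2 h1, List.mem_map.2 ⟨q.2, List.mem_range.2 h2, rfl⟩⟩
  set tgt : Nat × Nat → Nat × Nat := fun q => (label.getD q.1 0, label.getD q.2 0) with htgt
  set v : Nat × Nat → Int := fun q => (m.getD q.1 []).getD q.2 0 with hv
  set R := ps.foldl (fun mat q => mat.modify (tgt q).1 (fun row => row.set (tgt q).2 (v q)))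
      (List.replicate n (List.replicate n (0 : Int))) with hR
  have hflat : (List.range n).foldl
      (fun mat i =>
        (List.range n).foldl
          (fun mat j =>
            mat.modify (label.getD i 0) (fun row => row.set (label.getD j 0) ((m.getD i []).getD j 0)))
          mat)
      (List.replicate n (List.replicate n (0 : Int))) = R :=
    pvFoldlPairs
      (fun (mat : List (List Int)) i j =>
        List.modify mat (label.getD i 0) (fun row => row.set (label.getD j 0) ((m.getD i []).getD j 0)))
      (List.range n) (List.range n) (List.replicate n (List.replicate n (0 : Int)))
  have hinitshape : pvShape n (List.replicate n (List.replicate n (0 : Int))) := by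
    constructor
    · simp
    · intro a ha
      rw [List.getD_eq_getElem?_getD, List.getElem?_replicate]
      simp [ha]
  have hRshape : pvShape n R := pvShapeFoldl n tgt v ps _ hinitshape
  have hcell : ∀ a b, a < n → b < n →
      pvRead R a b = (m.getD (order.getD a 0) []).getD (order.getD b 0) 0 := by
    intro a b ha hb
    have haor : a < order.length := hordlen ▸ ha
    have hbor : b < order.length := hordlen ▸ hb
    have hOa : order.getD a 0 = order[a] := by
      rw [List.getD_eq_getElem?_getD, List.getElem?_eq_getElem haor, Option.getD_some]
    have hOb : order.getD b 0 = order[b] := by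
      rw [List.getD_eq_getElem?_getD, List.getElem?_eq_getElem hbor, Option.getD_some]
    have hOalt : order[a] < n := (hordmem _).1 (List.getElem_mem haor)
    have hOblt : order[b] < n := (hordmem _).1 (List.getElem_mem hbor)
    have hfind : ps.reverse.find? (fun q => tgt q == (a, b)) = some (order[a], order[b]) := by
      apply pvFindUnique
      · rw [List.mem_reverse, hpsmem]; exact ⟨hOalt, hOblt⟩
      · simp only [htgt, beq_iff_eq, Prod.mk.injEq]
        rw [hlabval _ hOalt, hlabval _ hOblt]
        exact ⟨hordnd.idxOf_getElem a haor, hordnd.idxOf_getElem b hbor⟩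
      · intro y hy hpy
        rw [List.mem_reverse, hpsmem] at hy
        simp only [htgt, beq_iff_eq, Prod.mk.injEq] at hpy
        rw [hlabval _ hy.1, hlabval _ hy.2] at hpy
        have h1 : order[List.idxOf y.1 order] = y.1 :=
          List.getElem_idxOf (List.idxOf_lt_length_of_mem ((hordmem _).2 hy.1))
        have h2 : order[List.idxOf y.2 order] = y.2 :=
          List.getElem_idxOf (List.idxOf_lt_length_of_mem ((hordmem _).2 hy.2))
        have e1 : y.1 = order[a] := by rw [← h1]; congr 1; exact hpy.1
        have e2 : y.2 = order[b] := by rw [← h2]; congr 1; exact hpy.2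
        exact Prod.ext e1 e2
    have hread := pvReadFoldl n tgt v ps (List.replicate n (List.replicate n (0 : Int)))
      hinitshape a b ha hb
    rw [hfind] at hread
    rw [hOa, hOb]
    exact hread
  refine hflat.trans ?_
  apply List.ext_getElem
  · rw [hRshape.1, List.length_map, List.length_range]
  · intro a h1 h2
    have ha : a < n := by rwa [hRshape.1] at h1
    have hRalen : R[a].length = n := by
      have := hRshape.2 a ha
      rwa [List.getD_eq_getElem?_getD, List.getElem?_eq_getElem h1, Option.getD_some] at this
    simp only [List.getElem_map, List.getElem_range]
    apply List.ext_getElem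
    · rw [hRalen, List.length_map, List.length_range]
    · intro b hb1 hb2
      have hb : b < n := by rwa [hRalen] at hb1
      simp only [List.getElem_map, List.getElem_range]
      have hRval : R[a][b] = pvRead R a b := by
        rw [pvRead, List.getD_eq_getElem?_getD (l := R) (i := a) (a := ([] : List Int)),
            List.getElem?_eq_getElem h1, Option.getD_some,
            List.getD_eq_getElem?_getD, List.getElem?_eq_getElem hb1, Option.getD_some]
      rw [hRval]
      exact hcell a b ha hb

-- insertBy appends when x goes before nothing.
theorem pvInsertByAppend {α : Type} (before : α → α → Bool) (x : α) :
    ∀ (l : List α), (∀ y ∈ l, before x y = false) → PySem.List.insertBy before x l = l ++ [x] := by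
  intro l
  induction l with
  | nil => intro _; rfl
  | cons z l ih =>
    intro h
    have hz := h z List.mem_cons_self
    simp only [PySem.List.insertBy, hz]
    simp only [Bool.false_eq_true, if_false, List.cons_append, List.cons.injEq, true_and]
    exact ih (fun y hy => h y (List.mem_cons_of_mem _ hy))

-- insertBy into a0 ++ a1 when x goes after all of a0 and before all of a1.
theorem pvInsertByMid {α : Type} (before : α → α → Bool) (x : α) :
    ∀ (a0 a1 : List α), (∀ y ∈ a0, before x y = false) → (∀ y ∈ a1, before x y = true) →
      PySem.List.insertBy before x (a0 ++ a1) = a0 ++ x :: a1 := by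
  intro a0
  induction a0 with
  | nil =>
    intro a1 _ h1
    cases a1 with
    | nil => rfl
    | cons z l =>
      have hz := h1 z List.mem_cons_self
      simp [PySem.List.insertBy, hz]
  | cons z a0 ih =>
    intro a1 h0 h1
    have hz := h0 z List.mem_cons_self
    simp only [List.cons_append, PySem.List.insertBy, hz]
    simp only [Bool.false_eq_true, if_false, List.cons.injEq, true_and]
    exact ih a1 (fun y hy => h0 y (List.mem_cons_of_mem _ hy)) h1

-- Stable sort by a 0/1-valued Int key is the two filters in order.
theorem pvSortedBinary {α : Type} (key : α → Int) (hbin : ∀ x, key x = 0 ∨ key x = 1) :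
    ∀ (xs a0 a1 : List α), (∀ y ∈ a0, key y = 0) → (∀ y ∈ a1, key y = 1) →
      xs.foldl (fun acc x => PySem.List.insertBy (fun a b => decide (key a < key b)) x acc) (a0 ++ a1)
      = (a0 ++ xs.filter (fun x => decide (key x = 0))) ++ (a1 ++ xs.filter (fun x => !decide (key x = 0))) := by
  intro xs
  induction xs with
  | nil => intro a0 a1 _ _; simp
  | cons x xs ih =>
    intro a0 a1 h0 h1
    rw [List.foldl_cons]
    rcases hbin x with hx | hx
    · have hstep : PySem.List.insertBy (fun a b => decide (key a < key b)) x (a0 ++ a1)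
          = (a0 ++ [x]) ++ a1 := by
        rw [pvInsertByMid]
        · simp
        · intro y hy; rw [hx, h0 y hy]; simp
        · intro y hy; rw [hx, h1 y hy]; simp
      rw [hstep, ih (a0 ++ [x]) a1 ?_ h1]
      · simp [List.filter_cons, hx, List.append_assoc]
      · intro y hy
        rcases List.mem_append.1 hy with h | h
        · exact h0 y h
        · simp at h; rw [h, hx]
    · have hstep : PySem.List.insertBy (fun a b => decide (key a < key b)) x (a0 ++ a1)
          = a0 ++ (a1 ++ [x]) := by
        rw [← List.append_assoc]
        apply pvInsertByAppend
        intro y hy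
        rcases List.mem_append.1 hy with h | h
        · rw [hx, h0 y h]; simp
        · rw [hx, h1 y h]; simp
      rw [hstep, ih a0 (a1 ++ [x]) h0 ?_]
      · have hxf : (decide (key x = 0)) = false := by simp [hx]
        simp [List.filter_cons, hxf, List.append_assoc]
      · intro y hy
        rcases List.mem_append.1 hy with h | h
        · exact h1 y h
        · simp at h; rw [h, hx]

-- enumerate m as a map over range (len m).
theorem pvEnumerateEq (m : List (List Int)) :
    PySem.List.enumerate m = (List.range m.length).map (fun i : Nat => ((i : Int), m.getD i [])) := by
  apply List.ext_getElem
  · simp [PySem.List.length_enumerate]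
  · intro k h1 h2
    have hk : k < m.length := by simpa [PySem.List.length_enumerate] using h1
    rw [PySem.List.getElem_enumerate]
    simp only [List.getElem_map, List.getElem_range]
    rw [List.getD_eq_getElem?_getD, List.getElem?_eq_getElem hk, Option.getD_some]
    simp

-- B equals the filter-based gather.
theorem pvBEq (m : List (List Int)) : transform_alt m = pvGather m := by
  unfold transform_alt pvGather
  simp only []
  set n := m.length with hn
  set nt := (List.range n).filter (fun i => !decide ((m.getD i []).sum = 0)) with hnt
  set t := (List.range n).filter (fun i => decide ((m.getD i []).sum = 0)) with ht
  set order := nt ++ t with horder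
  set f : Nat → Int × List Int := fun i : Nat => ((i : Int), m.getD i []) with hf
  set key : Int × List Int → Int := fun p => if p.2.sum = 0 then (1 : Int) else 0 with hkey
  -- the sort is the partition
  have hsorted : PySem.List.sorted (PySem.List.enumerate m) key = order.map f := by
    rw [PySem.List.sorted_eq_foldl_insertBy, pvEnumerateEq m]
    have hmain := pvSortedBinary key (fun x => by by_cases h : x.2.sum = 0 <;> simp [hkey, h])
      ((List.range n).map f) [] [] (by intro y hy; simp at hy) (by intro y hy; simp at hy)
    simp only [List.nil_append] at hmain
    rw [hmain]
    have hfilter0 : ((List.range n).map f).filter (fun x => decide (key x = 0))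
        = nt.map f := by
      rw [List.filter_map, hnt]
      congr 1
      apply List.filter_congr
      intro i _
      by_cases h : (m.getD i []).sum = 0 <;> simp [hkey, hf, h]
    have hfilter1 : ((List.range n).map f).filter (fun x => !decide (key x = 0))
        = t.map f := by
      rw [List.filter_map, ht]
      congr 1
      apply List.filter_congr
      intro i _
      by_cases h : (m.getD i []).sum = 0 <;> simp [hkey, hf, h]
    rw [hfilter0, hfilter1, horder, List.map_append]
  rw [hsorted]
  have hordlen : order.length = n := by
    have hperm : order.Perm (List.range n) := by
      have h1 := List.filter_append_perm (fun i => !decide ((m.getD i []).sum = 0)) (List.range n)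
      have h2 : (List.range n).filter (fun i => !!decide ((m.getD i []).sum = 0)) = t := by
        simp [ht]
      rw [h2] at h1
      exact h1
    rw [hperm.length_eq, List.length_range]
  -- perm = order as Ints
  have hperm' : (order.map f).map (fun p => p.1) = order.map (fun i : Nat => (i : Int)) := by
    rw [List.map_map, hf]
    rfl
  rw [hperm']
  -- cellwise equality
  apply List.ext_getElem
  · simp [hordlen]
  · intro a h1 h2
    have ha : a < order.length := by simpa using h1
    simp only [List.getElem_map, List.getElem_range]
    have hOa : order.getD a 0 = order[a] := by
      rw [List.getD_eq_getElem?_getD, List.getElem?_eq_getElem ha, Option.getD_some]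
    apply List.ext_getElem
    · simp [hordlen]
    · intro b hb1 hb2
      have hb : b < order.length := by simpa using hb1
      simp only [List.getElem_map, List.getElem_range]
      have hOb : order.getD b 0 = order[b] := by
        rw [List.getD_eq_getElem?_getD, List.getElem?_eq_getElem hb, Option.getD_some]
      rw [hOa, hOb]
      simp only [hf, List.getElem_map, PySem.List.pyGetD_natCast]

-- ===== VERDICT (by name: the statement is the Claim_ definition above) =====
theorem transform_spec : Claim_equal_transform := by
  intro m _ _
  unfold Spec_transform
  rw [pvAEq, pvBEq]
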